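-- pv_equiv track=rewrite | github.com/ttosi/csci1133 | hw11/problemB.py | two_es
-- ===== SOURCE A (Python) =====
-- def two_es(lines):
--     if len(lines) == 0:
--         return False
--
--     line = lines[len(lines) - 1]
--     if line.count("e") == 2:
--         return True
--     elif len(lines) - 1 != 0:
--         lines.remove(lines[len(lines) - 1])
--         return two_es(lines)
--
--     return False
-- ===== SOURCE B (Python) =====
-- def two_es(lines):
--     return any(line.count("e") == 2 for line in lines)
-- ===== Notes on version B (the rewrite author's own statement) =====
-- stated objective: simpler
-- what changed: Replaces A's recursion that repeatedly indexes the last element and destructively removes it with a single non-mutating forward any() scan; B does not mutate the argument list (return-value equivalence only).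
import Mathlib
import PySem

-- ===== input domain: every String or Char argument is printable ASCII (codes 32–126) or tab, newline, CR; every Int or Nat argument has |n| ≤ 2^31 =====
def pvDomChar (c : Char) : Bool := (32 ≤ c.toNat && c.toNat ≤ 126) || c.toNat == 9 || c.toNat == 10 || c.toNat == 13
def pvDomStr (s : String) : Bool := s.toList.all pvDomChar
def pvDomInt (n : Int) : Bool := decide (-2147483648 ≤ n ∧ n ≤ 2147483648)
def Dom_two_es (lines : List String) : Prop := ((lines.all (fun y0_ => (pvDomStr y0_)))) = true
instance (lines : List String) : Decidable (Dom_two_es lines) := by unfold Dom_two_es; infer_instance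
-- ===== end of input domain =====

-- B replaces A's recursion (index the last element, destructively remove it, recurse) by a
-- single non-mutating forward any() scan; A mutates its argument list via remove, B does not,
-- so the equivalence proved here is about the RETURN value only (objective: simpler).

-- ===== PORT A =====
-- A recursively inspects lines[len(lines)-1], returns True on count("e") == 2, otherwise
-- removes the (first occurrence of the) last element and recurses.  Each recursive call
-- shortens the list by one, so fuel := lines.length makes the recursion structural
-- (the fuel = 0 branch is unreachable; it only makes the same computation total).
def two_es_go : Nat → List String → Bool
  | 0, _ => false
  | Nat.succ fuel, lines =>
    if lines.length == 0 then false
    else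
      let line := PySem.List.pyGetD lines ((lines.length : Int) - 1) ""
      if PySem.Str.count line "e" == 2 then true
      else if (lines.length : Int) - 1 ≠ 0 then
        match PySem.List.remove? lines line with
        | some rest => two_es_go fuel rest
        | none => false        -- unreachable: line ∈ lines, so remove? succeeds
      else false

def two_es (lines : List String) : Bool := two_es_go lines.length lines

-- ===== PORT B =====
def two_es_alt (lines : List String) : Bool :=
  lines.any (fun line => PySem.Str.count line "e" == 2)

-- ===== PRECONDITION & SPEC =====
def Spec_two_es (lines : List String) (out : Bool) : Prop := out = two_es_alt lines
instance (lines : List String) (out : Bool) : Decidable (Spec_two_es lines out) := by unfold Spec_two_es; infer_instance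

-- ===== CLAIM (what is proved, stated in full; the proofs are below) =====
def Claim_equal_two_es : Prop := ∀ (lines : List String), Dom_two_es lines → Spec_two_es lines (two_es lines)

-- ===== LEMMAS AND PROOFS =====

-- `any` is invariant under permutation of the list.
theorem any_perm {α : Type} {xs ys : List α} (h : xs.Perm ys) (p : α → Bool) :
    xs.any p = ys.any p := by
  induction h with
  | nil => rfl
  | cons x _ ih => simp only [List.any_cons, ih]
  | swap x y l => simp only [List.any_cons, ← Bool.or_assoc, Bool.or_comm (p y) (p x)]
  | trans _ _ ih₁ ih₂ => rw [ih₁, ih₂]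

theorem two_es_go_eq_alt : ∀ (fuel : Nat) (lines : List String), lines.length ≤ fuel →
    two_es_go fuel lines = two_es_alt lines := by
  intro fuel
  induction fuel with
  | zero =>
    intro lines hn
    have : lines = [] := List.length_eq_zero_iff.mp (Nat.le_zero.mp hn)
    subst this
    simp [two_es_go, two_es_alt]
  | succ fuel ih =>
    intro lines hn
    rw [two_es_go]
    by_cases h0 : lines.length = 0
    · have : lines = [] := List.length_eq_zero_iff.mp h0
      subst this
      simp [two_es_alt]
    · simp only [h0, beq_iff_eq, if_false]
      have hmem : PySem.List.pyGetD lines ((lines.length : Int) - 1) "" ∈ lines :=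
        PySem.List.pyGetD_mem lines "" ⟨by omega, by omega⟩
      set line := PySem.List.pyGetD lines ((lines.length : Int) - 1) "" with hline
      by_cases hc : PySem.Str.count line "e" = 2
      · rw [if_pos hc]
        exact (List.any_eq_true.mpr ⟨line, hmem, by exact beq_iff_eq.mpr hc⟩).symm
      · rw [if_neg hc]
        by_cases hl : ((lines.length : Int) - 1 ≠ 0)
        · rw [if_pos hl]
          have hrm : PySem.List.remove? lines line = some (lines.erase line) :=
            PySem.List.remove?_eq_some_erase lines line hmem
          have hperm : lines.Perm (line :: lines.erase line) :=
            List.perm_cons_erase hmem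
          have hlt : (lines.erase line).length ≤ fuel := by
            have := List.length_erase_of_mem hmem
            omega
          rw [hrm]
          show two_es_go fuel (lines.erase line) = two_es_alt lines
          rw [ih _ hlt]
          unfold two_es_alt
          rw [any_perm hperm, List.any_cons, beq_eq_false_iff_ne.mpr hc, Bool.false_or]
        · rw [if_neg hl]
          have hlen1 : lines.length = 1 := by omega
          obtain ⟨x, hx⟩ := List.length_eq_one_iff.mp hlen1
          have hlx : line = x := by
            rw [hline, hx]
            norm_num [PySem.List.pyGetD_zero_cons]
          unfold two_es_alt
          rw [hx, List.any_cons, List.any_nil, ← hlx, beq_eq_false_iff_ne.mpr hc,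
            Bool.false_or]

-- ===== VERDICT (by name: the statement is the Claim_ definition above) =====
theorem two_es_spec : Claim_equal_two_es := by
  intro lines _
  unfold Spec_two_es
  exact two_es_go_eq_alt lines.length lines (le_refl _)
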